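-- pv_equiv track=rewrite | github.com/ServantsOfKnowledge/sok-oge | server/app.py | publication_parts
-- ===== SOURCE A (Python) =====
-- def publication_parts(publication_slug: str) -> tuple[str, str]:
--     tokens = publication_slug.split("_")
--     suffix = {"extraordinary", "weekly", "daily", "ordinary", "egaz", "govpress", "compose", "dsa"}
--     kind_tokens: list[str] = []
--     while tokens and tokens[-1] in suffix:
--         kind_tokens.insert(0, tokens.pop())
--     state_slug = "_".join(tokens) if tokens else publication_slug
--     publication_kind = " ".join(kind_tokens) if kind_tokens else "standard"
--     return state_slug, publication_kind
-- ===== SOURCE B (Python) =====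
-- def publication_parts(publication_slug: str) -> tuple[str, str]:
--     tokens = publication_slug.split("_")
--     suffix = {"extraordinary", "weekly", "daily", "ordinary", "egaz", "govpress", "compose", "dsa"}
--     cut = 0
--     for j, t in enumerate(tokens):
--         if t not in suffix:
--             cut = j + 1
--     state_tokens = tokens[:cut]
--     kind_tokens = tokens[cut:]
--     state_slug = "_".join(state_tokens) if state_tokens else publication_slug
--     publication_kind = " ".join(kind_tokens) if kind_tokens else "standard"
--     return state_slug, publication_kind
-- ===== Notes on version B (the rewrite author's own statement) =====
-- stated objective: simpler
-- what changed: Instead of destructively popping trailing suffix tokens into a second list, B makes one forward enumerate pass recording the cut index after the last non-suffix token and then builds both halves with two slices; no list mutation.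
import Mathlib
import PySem

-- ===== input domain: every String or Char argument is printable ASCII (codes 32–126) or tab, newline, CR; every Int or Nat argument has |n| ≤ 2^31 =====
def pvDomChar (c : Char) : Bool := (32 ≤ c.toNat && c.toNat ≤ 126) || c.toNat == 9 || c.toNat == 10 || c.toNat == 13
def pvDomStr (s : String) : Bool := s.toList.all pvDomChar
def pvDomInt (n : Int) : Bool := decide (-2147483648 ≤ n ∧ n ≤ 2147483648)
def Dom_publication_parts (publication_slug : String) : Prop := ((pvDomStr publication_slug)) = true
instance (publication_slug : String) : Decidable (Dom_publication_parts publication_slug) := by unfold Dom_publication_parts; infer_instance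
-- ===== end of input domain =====

-- B replaces A's destructive pop-from-the-end loop by a forward scan computing a cut
-- index and two slices (objective: simpler, no mutation; same return value everywhere).

-- ===== PORT A =====
def pubSuffix : PySem.Set String :=
  PySem.Set.ofList ["extraordinary", "weekly", "daily", "ordinary", "egaz", "govpress", "compose", "dsa"]

-- A's while loop: 'while tokens and tokens[-1] in suffix: kind_tokens.insert(0, tokens.pop())'
def pubLoopA (tokens kind : List String) : List String × List String :=
  match h : tokens.getLast? with
  | some t =>
    if t ∈ pubSuffix then pubLoopA tokens.dropLast (t :: kind) else (tokens, kind)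
  | none => (tokens, kind)
termination_by tokens.length
decreasing_by
  cases tokens with
  | nil => simp at h
  | cons a as => simp [List.length_dropLast]

def publication_parts (publication_slug : String) : String × String :=
  let tokens := (PySem.Chars.splitOn publication_slug.toList "_".toList).map String.ofList
  let p := pubLoopA tokens []
  let state_slug := if p.1 ≠ [] then PySem.Str.join "_" p.1 else publication_slug
  let publication_kind := if p.2 ≠ [] then PySem.Str.join " " p.2 else "standard"
  (state_slug, publication_kind)

-- ===== PORT B =====
def publication_parts_alt (publication_slug : String) : String × String :=
  let tokens := (PySem.Chars.splitOn publication_slug.toList "_".toList).map String.ofList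
  let cut := (PySem.List.enumerate tokens).foldl
      (fun cut jt => if jt.2 ∈ pubSuffix then cut else jt.1 + 1) (0 : Int)
  let state_tokens := PySem.List.slice tokens none (some cut)
  let kind_tokens := PySem.List.slice tokens (some cut) none
  let state_slug := if state_tokens ≠ [] then PySem.Str.join "_" state_tokens else publication_slug
  let publication_kind := if kind_tokens ≠ [] then PySem.Str.join " " kind_tokens else "standard"
  (state_slug, publication_kind)

-- ===== PRECONDITION & SPEC =====
def Spec_publication_parts (publication_slug : String) (out : String × String) : Prop := out = publication_parts_alt publication_slug
instance (publication_slug : String) (out : String × String) : Decidable (Spec_publication_parts publication_slug out) := by unfold Spec_publication_parts; infer_instance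

-- ===== CLAIM (what is proved, stated in full; the proofs are below) =====
def Claim_equal_publication_parts : Prop := ∀ (publication_slug : String), Dom_publication_parts publication_slug → Spec_publication_parts publication_slug (publication_parts publication_slug)

-- ===== LEMMAS AND PROOFS =====

-- length of the trailing run of suffix tokens, via the reversed list
def pubAux : List String → Nat
  | [] => 0
  | t :: rest => if t ∈ pubSuffix then pubAux rest else rest.length + 1

def pubCut (xs : List String) : Nat := pubAux xs.reverse

theorem pubCut_nil : pubCut [] = 0 := rfl

theorem pubCut_concat (xs : List String) (t : String) :
    pubCut (xs ++ [t]) = if t ∈ pubSuffix then pubCut xs else xs.length + 1 := by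
  simp [pubCut, pubAux]

theorem pubAux_le (l : List String) : pubAux l ≤ l.length := by
  induction l with
  | nil => simp [pubAux]
  | cons t rest ih => simp [pubAux]; split <;> omega

theorem pubCut_le (xs : List String) : pubCut xs ≤ xs.length := by
  have := pubAux_le xs.reverse
  simpa [pubCut] using this

theorem foldlCut_eq (xs : List String) :
    (PySem.List.enumerate xs).foldl
      (fun cut jt => if jt.2 ∈ pubSuffix then cut else jt.1 + 1) (0 : Int)
    = (pubCut xs : Int) := by
  induction xs using List.reverseRecOn with
  | nil => rfl
  | append_singleton xs t ih =>
    rw [PySem.List.enumerate_append, List.foldl_append, ih, pubCut_concat]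
    by_cases h : t ∈ pubSuffix <;>
      simp [PySem.List.enumerate, h]

theorem pubLoopA_eq (tokens : List String) : ∀ kind,
    pubLoopA tokens kind = (tokens.take (pubCut tokens), tokens.drop (pubCut tokens) ++ kind) := by
  induction tokens using List.reverseRecOn with
  | nil => intro kind; simp [pubLoopA, pubCut_nil]
  | append_singleton xs t ih =>
    intro kind
    rw [pubLoopA]
    split
    next t' heq =>
      have ht : t' = t := by simpa using heq.symm
      subst ht
      by_cases h : t' ∈ pubSuffix
      · rw [if_pos h]
        simp only [List.dropLast_concat]
        rw [ih, pubCut_concat, if_pos h]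
        have hle := pubCut_le xs
        rw [List.take_append_of_le_length hle, List.drop_append_of_le_length hle]
        simp
      · rw [if_neg h, pubCut_concat, if_neg h]
        have hlen : (xs ++ [t']).length = xs.length + 1 := by simp
        rw [← hlen, List.take_length, List.drop_length]
        simp
    next heq => simp at heq

-- ===== VERDICT (by name: the statement is the Claim_ definition above) =====
theorem publication_parts_spec : Claim_equal_publication_parts := by
  intro s _
  simp only [Spec_publication_parts, publication_parts, publication_parts_alt]
  rw [foldlCut_eq, pubLoopA_eq, PySem.List.slice_to_natCast, PySem.List.slice_from_natCast]
  simp
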